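-- pv_equiv track=rewrite | github.com/Fivebulldogs/aoc | 2024/day20/part2.py | get_nearby_obstacles
-- ===== SOURCE A (Python) =====
-- def get_nearby_obstacles(
--     pos: tuple[int, int], obstacles: dict, width: int, height: int
-- ):
--     nearby_obstacles = []
--
--     # above
--     x = pos[0]
--     y_set = obstacles.get(x)
--     y = pos[1]
--     while y > 0:
--         if y_set is not None and y - 1 in y_set:
--             nearby_obstacles.append((x, y - 1))
--         y -= 1
--
--     # below
--     x = pos[0]
--     y = pos[1]
--     y_set = obstacles.get(x)
--     while y < height - 1:
--         if y_set is not None and y + 1 in y_set: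
--             nearby_obstacles.append((x, y + 1))
--         y += 1
--
--     # left
--     x = pos[0]
--     y = pos[1]
--     while x > 0:
--         y_set = obstacles.get(x - 1)
--         if y_set is not None and y in y_set:
--             nearby_obstacles.append((x - 1, y))
--         x -= 1
--
--     # right
--     x = pos[0]
--     y = pos[1]
--     while x < width - 1:
--         y_set = obstacles.get(x + 1)
--         if y_set is not None and y in y_set:
--             nearby_obstacles.append((x + 1, y))
--         x += 1
--
--     return nearby_obstacles
-- ===== SOURCE B (Python) =====
-- def get_nearby_obstacles(
--     pos: tuple[int, int], obstacles: dict, width: int, height: int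
-- ):
--     x0, y0 = pos
--     col = obstacles.get(x0, set())
--     above = [(x0, y) for y in sorted((y for y in col if 0 <= y < y0), reverse=True)]
--     below = [(x0, y) for y in sorted(y for y in col if y0 < y <= height - 1)]
--     row = sorted(x for x, ys in obstacles.items() if y0 in ys)
--     left = [(x, y0) for x in reversed([x for x in row if 0 <= x < x0])]
--     right = [(x, y0) for x in row if x0 < x <= width - 1]
--     return above + below + left + right
-- ===== Notes on version B (the rewrite author's own statement) =====
-- stated objective: alternative
-- what changed: A probes every grid cell in the four directions (two coordinate while-loops per axis, O(width+height) dict/set lookups); B never walks the grid: it filters and sorts the column's obstacle set for above/below and builds one sorted index of columns containing pos[1] for left/right, concatenating the four sorted slices.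
import Mathlib
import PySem

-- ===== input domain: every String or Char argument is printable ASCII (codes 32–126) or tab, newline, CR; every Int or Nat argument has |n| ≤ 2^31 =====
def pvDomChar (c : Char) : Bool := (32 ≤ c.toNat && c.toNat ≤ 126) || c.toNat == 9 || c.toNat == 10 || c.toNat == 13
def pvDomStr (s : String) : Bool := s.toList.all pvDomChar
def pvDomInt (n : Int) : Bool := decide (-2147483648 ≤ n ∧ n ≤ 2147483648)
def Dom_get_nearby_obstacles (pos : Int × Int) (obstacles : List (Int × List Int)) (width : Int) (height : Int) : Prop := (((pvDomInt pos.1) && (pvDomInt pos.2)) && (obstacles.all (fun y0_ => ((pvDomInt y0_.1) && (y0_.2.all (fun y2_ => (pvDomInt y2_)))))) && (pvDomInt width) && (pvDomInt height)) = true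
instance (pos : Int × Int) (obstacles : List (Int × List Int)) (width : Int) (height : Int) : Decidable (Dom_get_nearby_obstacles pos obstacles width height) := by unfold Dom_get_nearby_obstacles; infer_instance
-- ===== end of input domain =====

-- B replaces A's four per-cell grid scans (O(width+height) probes) by iterating the obstacle data itself:
-- filter+sort the column set and a once-built sorted row index (alternative algorithm, same results).


-- ===== PORT A =====
def get_nearby_obstacles (pos : Int × Int) (obstacles : List (Int × List Int)) (width : Int) (height : Int) : List (Int × Int) :=
  -- above: while y > 0, test y-1 in obstacles.get(pos[0])
  let ySet : Option (List Int) := PySem.Dict.get? (PySem.Dict.mk obstacles) pos.1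
  let acc : List (Int × Int) := (PySem.List.pyRange pos.2 0 (-1)).foldl
    (fun acc y => if (match ySet with | some s => s.contains (y - 1) | none => false)
                  then acc ++ [(pos.1, y - 1)] else acc) []
  -- below: while y < height - 1, test y+1
  let acc := (PySem.List.pyRange pos.2 (height - 1) 1).foldl
    (fun acc y => if (match ySet with | some s => s.contains (y + 1) | none => false)
                  then acc ++ [(pos.1, y + 1)] else acc) acc
  -- left: while x > 0, look up obstacles.get(x-1), test pos[1]
  let acc := (PySem.List.pyRange pos.1 0 (-1)).foldl
    (fun acc x => if (match PySem.Dict.get? (PySem.Dict.mk obstacles) (x - 1) with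
                      | some s => s.contains pos.2 | none => false)
                  then acc ++ [(x - 1, pos.2)] else acc) acc
  -- right: while x < width - 1, look up obstacles.get(x+1)
  let acc := (PySem.List.pyRange pos.1 (width - 1) 1).foldl
    (fun acc x => if (match PySem.Dict.get? (PySem.Dict.mk obstacles) (x + 1) with
                      | some s => s.contains pos.2 | none => false)
                  then acc ++ [(x + 1, pos.2)] else acc) acc
  acc

-- ===== PORT B =====
def get_nearby_obstacles_alt (pos : Int × Int) (obstacles : List (Int × List Int)) (width : Int) (height : Int) : List (Int × Int) :=
  let x0 := pos.1
  let y0 := pos.2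
  let col : List Int := (PySem.Dict.get? (PySem.Dict.mk obstacles) x0).getD []
  let above := (PySem.List.sorted (col.filter (fun y => decide (0 ≤ y) && decide (y < y0))) (fun y => y) true).map (fun y => (x0, y))
  let below := (PySem.List.sorted (col.filter (fun y => decide (y0 < y) && decide (y ≤ height - 1))) (fun y => y) false).map (fun y => (x0, y))
  let row := PySem.List.sorted ((PySem.Dict.mk obstacles).items.filterMap (fun p => if p.2.contains y0 then some p.1 else none)) (fun x => x) false
  let left := ((row.filter (fun x => decide (0 ≤ x) && decide (x < x0))).reverse).map (fun x => (x, y0))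
  let right := (row.filter (fun x => decide (x0 < x) && decide (x ≤ width - 1))).map (fun x => (x, y0))
  above ++ below ++ left ++ right

-- ===== PRECONDITION & SPEC =====
-- Pre_ admits exactly the association lists that faithfully encode A's Python input, a dict mapping
-- each column x to a SET of rows: keys distinct (a Python dict cannot repeat a key) and each value list
-- duplicate-free (the convention's encoding of a set); no Python-representable input is excluded.
def Pre_get_nearby_obstacles (pos : Int × Int) (obstacles : List (Int × List Int)) (width : Int) (height : Int) : Prop :=
  (obstacles.map Prod.fst).Nodup ∧ ∀ p ∈ obstacles, p.2.Nodup
instance (pos : Int × Int) (obstacles : List (Int × List Int)) (width : Int) (height : Int) : Decidable (Pre_get_nearby_obstacles pos obstacles width height) := by unfold Pre_get_nearby_obstacles; infer_instance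
def pvWitness_get_nearby_obstacles : (Int × Int) × (List (Int × List Int)) × Int × Int :=
  ((2, 1), [(0, [1, 3]), (2, [0, 3]), (3, [1])], 5, 4)
def Spec_get_nearby_obstacles (pos : Int × Int) (obstacles : List (Int × List Int)) (width : Int) (height : Int) (out : List (Int × Int)) : Prop := out = get_nearby_obstacles_alt pos obstacles width height
instance (pos : Int × Int) (obstacles : List (Int × List Int)) (width : Int) (height : Int) (out : List (Int × Int)) : Decidable (Spec_get_nearby_obstacles pos obstacles width height out) := by unfold Spec_get_nearby_obstacles; infer_instance

-- ===== CLAIM (what is proved, stated in full; the proofs are below) =====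
def Claim_equal_get_nearby_obstacles : Prop := ∀ (pos : Int × Int) (obstacles : List (Int × List Int)) (width : Int) (height : Int), Dom_get_nearby_obstacles pos obstacles width height → Pre_get_nearby_obstacles pos obstacles width height → Spec_get_nearby_obstacles pos obstacles width height (get_nearby_obstacles pos obstacles width height)

-- ===== LEMMAS AND PROOFS =====

-- dict lookup ↔ membership, under distinct keys
theorem pvGetq_mem (l : List (Int × List Int)) (k : Int) (v : List Int)
    (h : (PySem.Dict.mk l).get? k = some v) : (k, v) ∈ l := by
  induction l with
  | nil => simp [PySem.Dict.get?] at h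
  | cons p t ih =>
    rw [PySem.Dict.get?_mk_cons] at h
    split at h
    · next he => cases p; simp_all
    · next he => exact List.mem_cons_of_mem _ (ih h)

theorem pvMem_getq (l : List (Int × List Int)) (k : Int) (v : List Int)
    (hk : (l.map Prod.fst).Nodup) (h : (k, v) ∈ l) : (PySem.Dict.mk l).get? k = some v := by
  induction l with
  | nil => simp at h
  | cons p t ih =>
    rw [PySem.Dict.get?_mk_cons]
    simp at hk
    rcases List.mem_cons.1 h with he | hm
    · simp [← he]
    · have hne : ¬ (p.1 == k) := by
        simp
        intro hq
        exact hk.1 v (by rw [hq]; exact hm)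
      simp [hne]
      exact ih hk.2 hm

-- two strictly descending (resp. ascending) integer lists with the same members are equal
theorem pvInts_eq_desc (l1 l2 : List Int) (h1 : l1.Pairwise (· > ·)) (h2 : l2.Pairwise (· > ·))
    (hm : ∀ z, z ∈ l1 ↔ z ∈ l2) : l1 = l2 := by
  exact ((List.perm_ext_iff_of_nodup (h1.imp (fun h => by omega)) (h2.imp (fun h => by omega))).2 hm).eq_of_pairwise
    (fun a b _ _ x y => by omega) h1 h2

theorem pvInts_eq_asc (l1 l2 : List Int) (h1 : l1.Pairwise (· < ·)) (h2 : l2.Pairwise (· < ·))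
    (hm : ∀ z, z ∈ l1 ↔ z ∈ l2) : l1 = l2 := by
  exact ((List.perm_ext_iff_of_nodup (h1.imp (fun h => by omega)) (h2.imp (fun h => by omega))).2 hm).eq_of_pairwise
    (fun a b _ _ x y => by omega) h1 h2

-- a filtered-scan segment of A, reshaped as map-of-filter over the shifted range
theorem pvSeg (r : List Int) (f : Int → Int) (q : Int → Bool) (g : Int → Int × Int) :
    (r.filter (fun y => q (f y))).map (fun y => g (f y)) = ((r.map f).filter q).map g := by
  induction r with
  | nil => rfl
  | cons a t ih =>
    by_cases h : q (f a) = true <;> simp [h, ih]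

-- the shifted descending scan range: members and order
theorem pvDescm_mem (a z : Int) :
    z ∈ (PySem.List.pyRange a 0 (-1)).map (fun y => y - 1) ↔ 0 ≤ z ∧ z < a := by
  rw [PySem.List.pyRange_neg_one_eq_reverse]
  simp only [List.map_reverse, List.mem_reverse, List.mem_map, PySem.List.mem_pyRange_one]
  constructor
  · rintro ⟨y, hy, rfl⟩; omega
  · intro hz; exact ⟨z + 1, by omega, by omega⟩

theorem pvDescm_pairwise (a : Int) :
    ((PySem.List.pyRange a 0 (-1)).map (fun y => y - 1)).Pairwise (· > ·) := by
  rw [PySem.List.pyRange_neg_one_eq_reverse, List.pairwise_map, List.pairwise_reverse]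
  exact (PySem.List.pairwise_lt_pyRange_one (0 + 1) (a + 1)).imp (fun h => by omega)

theorem pvAscm_mem (a b z : Int) :
    z ∈ (PySem.List.pyRange a b 1).map (fun y => y + 1) ↔ a < z ∧ z ≤ b := by
  simp only [List.mem_map, PySem.List.mem_pyRange_one]
  constructor
  · rintro ⟨y, hy, rfl⟩; omega
  · intro hz; exact ⟨z - 1, by omega, by omega⟩

theorem pvAscm_pairwise (a b : Int) :
    ((PySem.List.pyRange a b 1).map (fun y => y + 1)).Pairwise (· < ·) := by
  rw [List.pairwise_map]
  exact (PySem.List.pairwise_lt_pyRange_one a b).imp (fun h => by omega)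

-- strict order of B's sorted lists, from nodup
theorem pvSorted_rev_gt (l : List Int) (hn : l.Nodup) :
    (PySem.List.sorted l (fun y => y) true).Pairwise (· > ·) := by
  have hp := PySem.List.sorted_pairwise_rev (xs := l) (key := fun y => y)
  have hn' : (PySem.List.sorted l (fun y => y) true).Nodup :=
    ((PySem.List.sorted_perm (xs := l) (key := fun y => y) (rev := true)).nodup_iff).2 hn
  exact (hp.and hn').imp (fun h => lt_of_le_of_ne h.1 (Ne.symm h.2))

theorem pvSorted_lt (l : List Int) (hn : l.Nodup) :
    (PySem.List.sorted l (fun y => y) false).Pairwise (· < ·) := by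
  have hp := PySem.List.sorted_pairwise (xs := l) (key := fun y => y)
  have hn' : (PySem.List.sorted l (fun y => y) false).Nodup :=
    ((PySem.List.sorted_perm (xs := l) (key := fun y => y) (rev := false)).nodup_iff).2 hn
  exact (hp.and hn').imp (fun h => lt_of_le_of_ne h.1 h.2)

-- the row-candidate list: nodup under distinct keys, and its membership = A's lookup test
theorem pvCand_nodup (obs : List (Int × List Int)) (y0 : Int) (hk : (obs.map Prod.fst).Nodup) :
    (obs.filterMap (fun p => if p.2.contains y0 then some p.1 else none)).Nodup := by
  induction obs with
  | nil => simp
  | cons p t ih =>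
    simp at hk
    by_cases h : y0 ∈ p.2 <;> simp [h]
    · exact ⟨fun x hx _ => absurd hx (hk.1 x), by simpa using ih hk.2⟩
    · simpa using ih hk.2

theorem pvQrow_iff (obs : List (Int × List Int)) (y0 z : Int) (hk : (obs.map Prod.fst).Nodup) :
    (match PySem.Dict.get? (PySem.Dict.mk obs) z with
     | some s => s.contains y0 | none => false) = true ↔
    z ∈ obs.filterMap (fun p => if p.2.contains y0 then some p.1 else none) := by
  constructor
  · intro h
    cases hq : PySem.Dict.get? (PySem.Dict.mk obs) z with
    | none => rw [hq] at h; simp at h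
    | some s =>
      rw [hq] at h
      simp at h
      exact List.mem_filterMap.2 ⟨(z, s), pvGetq_mem obs z s hq, by simp [h]⟩
  · intro h
    obtain ⟨⟨p1, p2⟩, hp, hps⟩ := List.mem_filterMap.1 h
    by_cases hc : y0 ∈ p2 <;> simp [hc] at hps
    rw [pvMem_getq obs z p2 hk (by rw [← hps]; exact hp)]
    simp [hc]

-- ===== VERDICT (by name: the statement is the Claim_ definition above) =====
theorem get_nearby_obstacles_spec : Claim_equal_get_nearby_obstacles := by
  intro pos obs width height _ hpre
  obtain ⟨hk, hv⟩ := hpre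
  obtain ⟨x0, y0⟩ := pos
  unfold Spec_get_nearby_obstacles
  simp only [get_nearby_obstacles, get_nearby_obstacles_alt,
    PySem.List.foldl_append_if, List.nil_append, List.append_assoc]
  refine congrArg₂ (· ++ ·) ?_ (congrArg₂ (· ++ ·) ?_ (congrArg₂ (· ++ ·) ?_ ?_))
  -- above
  · cases hcase : PySem.Dict.get? (PySem.Dict.mk obs) x0 with
    | none => simp [PySem.List.sorted_eq_nil_iff]
    | some s =>
      have hsn : s.Nodup := hv (x0, s) (pvGetq_mem obs x0 s hcase)
      simp only [Option.getD_some]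
      refine (pvSeg (PySem.List.pyRange y0 0 (-1)) (fun y => y - 1)
        (fun z => s.contains z) (fun z => ((x0 : Int), z))).trans (congrArg _ ?_)
      refine pvInts_eq_desc _ _ (List.Pairwise.sublist List.filter_sublist (pvDescm_pairwise y0))
        (pvSorted_rev_gt _ (hsn.filter _)) (fun z => ?_)
      simp only [List.mem_filter, PySem.List.mem_sorted, pvDescm_mem,
        Bool.and_eq_true, decide_eq_true_eq, List.contains_iff_mem]
      tauto
  -- below
  · cases hcase : PySem.Dict.get? (PySem.Dict.mk obs) x0 with
    | none => simp [PySem.List.sorted_eq_nil_iff]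
    | some s =>
      have hsn : s.Nodup := hv (x0, s) (pvGetq_mem obs x0 s hcase)
      simp only [Option.getD_some]
      refine (pvSeg (PySem.List.pyRange y0 (height - 1) 1) (fun y => y + 1)
        (fun z => s.contains z) (fun z => ((x0 : Int), z))).trans (congrArg _ ?_)
      refine pvInts_eq_asc _ _ (List.Pairwise.sublist List.filter_sublist (pvAscm_pairwise y0 (height - 1)))
        (pvSorted_lt _ (hsn.filter _)) (fun z => ?_)
      simp only [List.mem_filter, PySem.List.mem_sorted, pvAscm_mem,
        Bool.and_eq_true, decide_eq_true_eq, List.contains_iff_mem]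
      tauto
  -- left
  · refine (pvSeg (PySem.List.pyRange x0 0 (-1)) (fun y => y - 1)
      (fun z => match PySem.Dict.get? (PySem.Dict.mk obs) z with
                | some s => s.contains y0 | none => false)
      (fun z => (z, y0))).trans (congrArg _ ?_)
    refine pvInts_eq_desc _ _ (List.Pairwise.sublist List.filter_sublist (pvDescm_pairwise x0))
      (List.pairwise_reverse.2 ((List.Pairwise.sublist List.filter_sublist
        (pvSorted_lt _ (pvCand_nodup obs y0 hk))).imp (fun h => h))) (fun z => ?_)
    simp only [List.mem_filter, List.mem_reverse, PySem.List.mem_sorted, pvDescm_mem,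
      Bool.and_eq_true, decide_eq_true_eq, pvQrow_iff obs y0 z hk]
    tauto
  -- right
  · refine (pvSeg (PySem.List.pyRange x0 (width - 1) 1) (fun y => y + 1)
      (fun z => match PySem.Dict.get? (PySem.Dict.mk obs) z with
                | some s => s.contains y0 | none => false)
      (fun z => (z, y0))).trans (congrArg _ ?_)
    refine pvInts_eq_asc _ _ (List.Pairwise.sublist List.filter_sublist (pvAscm_pairwise x0 (width - 1)))
      (List.Pairwise.sublist List.filter_sublist (pvSorted_lt _ (pvCand_nodup obs y0 hk))) (fun z => ?_)
    simp only [List.mem_filter, PySem.List.mem_sorted, pvAscm_mem,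
      Bool.and_eq_true, decide_eq_true_eq, pvQrow_iff obs y0 z hk]
    tauto
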